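-- pv_equiv track=rewrite | github.com/tofagerl/emailfilter | src/emailfilter/filter.py | filter_emails
-- ===== SOURCE A (Python) =====
-- from typing import Dict, List, Optional
--
-- def filter_emails(
--     emails: List[Dict[str, str]],
--     filters: Optional[Dict[str, str]] = None
-- ) -> List[Dict[str, str]]:
--     """
--     Filter emails based on provided criteria.
--
--     Args:
--         emails: List of email dictionaries with keys like 'subject', 'from', 'body', etc.
--         filters: Dictionary of filter criteria (e.g., {'from': 'example.com'})
--
--     Returns:
--         List of emails that match the filter criteria
--     """
--     if not filters:
--         return emails
--
--     filtered_emails = []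
--
--     for email in emails:
--         matches = True
--         for key, value in filters.items():
--             if key not in email or value not in email[key]:
--                 matches = False
--                 break
--
--         if matches:
--             filtered_emails.append(email)
--
--     return filtered_emails
-- ===== SOURCE B (Python) =====
-- from typing import Dict, List, Optional
--
-- def filter_emails(
--     emails: List[Dict[str, str]],
--     filters: Optional[Dict[str, str]] = None
-- ) -> List[Dict[str, str]]:
--     """Apply each filter criterion in turn to a shrinking list of emails."""
--     result = emails
--     for key, value in (filters or {}).items():
--         result = [e for e in result if key in e and value in e[key]]
--     return result
-- ===== Notes on version B (the rewrite author's own statement) =====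
-- stated objective: alternative
-- what changed: B applies each filter criterion sequentially to a shrinking list (filters in the outer loop, one list-filter pass per criterion), instead of A's single pass over emails with an inner all-criteria loop, break, and accumulator append.
import Mathlib
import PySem

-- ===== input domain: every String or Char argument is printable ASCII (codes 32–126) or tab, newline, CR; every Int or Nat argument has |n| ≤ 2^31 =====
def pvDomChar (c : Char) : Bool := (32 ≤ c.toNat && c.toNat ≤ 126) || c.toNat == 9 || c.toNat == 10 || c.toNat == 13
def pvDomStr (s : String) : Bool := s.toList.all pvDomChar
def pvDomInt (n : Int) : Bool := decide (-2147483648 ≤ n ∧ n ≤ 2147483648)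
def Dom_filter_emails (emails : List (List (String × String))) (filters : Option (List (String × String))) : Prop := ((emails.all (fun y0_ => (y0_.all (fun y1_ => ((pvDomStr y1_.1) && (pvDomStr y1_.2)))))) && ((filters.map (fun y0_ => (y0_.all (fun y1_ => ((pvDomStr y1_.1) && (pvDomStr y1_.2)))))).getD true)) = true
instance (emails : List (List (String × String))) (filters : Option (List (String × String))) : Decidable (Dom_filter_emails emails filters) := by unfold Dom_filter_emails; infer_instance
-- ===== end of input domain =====

-- B applies each filter criterion in turn to a shrinking list (filters outer, one filter pass per
-- criterion) instead of A's single email pass with an inner all-criteria loop and break: alternative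
-- decomposition, same cost.

-- ===== PORT A =====
-- inner 'for key, value in filters.items(): … break' loop of A (matches flag with early exit)
def pvAMatches (email : List (String × String)) : List (String × String) → Bool
  | [] => true
  | (k, v) :: rest =>
    match email.lookup k with       -- 'key not in email' / 'email[key]' (dict lookup = first match)
    | none => false                  -- matches = False; break
    | some s =>
      if PySem.Str.isIn v s then pvAMatches email rest
      else false                     -- 'value not in email[key]': matches = False; break

def filter_emails (emails : List (List (String × String))) (filters : Option (List (String × String))) : List (List (String × String)) :=
  match filters with
  | none => emails                   -- 'if not filters: return emails'
  | some fs =>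
    if fs.isEmpty then emails        -- an empty dict is also falsy
    else emails.foldl (fun acc e => if pvAMatches e fs then acc ++ [e] else acc) []

-- ===== PORT B =====
-- 'key in e and value in e[key]' for one criterion kv
def pvPass (kv : String × String) (e : List (String × String)) : Bool :=
  match e.lookup kv.1 with
  | none => false
  | some s => PySem.Str.isIn kv.2 s

def filter_emails_alt (emails : List (List (String × String))) (filters : Option (List (String × String))) : List (List (String × String)) :=
  match filters with
  | none => emails                   -- '(filters or {})' with filters = None: no iterations
  | some fs => fs.foldl (fun res kv => res.filter (pvPass kv)) emails

-- ===== PRECONDITION & SPEC =====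
def Spec_filter_emails (emails : List (List (String × String))) (filters : Option (List (String × String))) (out : List (List (String × String))) : Prop := out = filter_emails_alt emails filters
instance (emails : List (List (String × String))) (filters : Option (List (String × String))) (out : List (List (String × String))) : Decidable (Spec_filter_emails emails filters out) := by unfold Spec_filter_emails; infer_instance

-- ===== CLAIM (what is proved, stated in full; the proofs are below) =====
def Claim_equal_filter_emails : Prop := ∀ (emails : List (List (String × String))) (filters : Option (List (String × String))), Dom_filter_emails emails filters → Spec_filter_emails emails filters (filter_emails emails filters)

-- ===== LEMMAS AND PROOFS =====

-- A's inner break-loop decides the conjunction of B's per-criterion tests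
theorem pvAMatches_eq_all (email : List (String × String)) (fs : List (String × String)) :
    pvAMatches email fs = fs.all (fun kv => pvPass kv email) := by
  induction fs with
  | nil => rfl
  | cons kv rest ih =>
    obtain ⟨k, v⟩ := kv
    simp only [pvAMatches, pvPass, List.all_cons]
    cases email.lookup k with
    | none => rfl
    | some s => by_cases h : PySem.Str.isIn v s <;> simp [pvPass, h, ih]

-- B's sequential filtering collapses to one filter by the conjunction of all criteria
theorem pvFoldFilter_eq (fs : List (String × String)) (emails : List (List (String × String))) :
    fs.foldl (fun res kv => res.filter (pvPass kv)) emails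
      = emails.filter (fun e => fs.all (fun kv => pvPass kv e)) := by
  induction fs generalizing emails with
  | nil => simp
  | cons kv rest ih =>
    simp only [List.foldl_cons, ih, List.filter_filter, List.all_cons]
    exact List.filter_congr fun a _ => Bool.and_comm _ _

-- ===== VERDICT (by name: the statement is the Claim_ definition above) =====
theorem filter_emails_spec : Claim_equal_filter_emails := by
  intro emails filters _
  unfold Spec_filter_emails filter_emails filter_emails_alt
  cases filters with
  | none => rfl
  | some fs =>
    cases fs with
    | nil => simp
    | cons kv rest =>
      simp only [List.isEmpty_cons, if_false, Bool.false_eq_true]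
      rw [PySem.List.foldl_append_if_eq_filter, pvFoldFilter_eq, List.nil_append]
      exact List.filter_congr (fun e _ => pvAMatches_eq_all e (kv :: rest))
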